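-- pv_equiv track=rewrite | github.com/ajaythakur3369/Coding-Ninjas | 8_March_(Day_40)_2024.py | allSenteces
-- ===== SOURCE A (Python) =====
-- from typing import List
--
-- def allSenteces(n: int, s: str) -> List[List[str]]:
--
--     '''
--     write your code here
--     '''
--
--     def solve(ind, s, ds, ans):
--         if ind >= len(s):
--             ans.append(ds[:])
--             return
--
--         temp = ""
--         for i in range(ind, len(s)):
--             temp += s[i]
--             ds.append(temp)
--             solve(i + 1, s, ds, ans)
--             ds.pop()
--
--         temp = temp[:-1]
--
--     ans = []
--     ds = []
--     solve(0, s, ds, ans)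
--     return ans
-- ===== SOURCE B (Python) =====
-- from typing import List
--
-- def allSenteces(n: int, s: str) -> List[List[str]]:
--     # Bottom-up dynamic programming: table[i] holds all partitions of s[i:],
--     # built from the end of the string; table[L] = [[]].
--     L = len(s)
--     table = [[[]]]  # table for suffix starting at L, growing at the front
--     for i in range(L - 1, -1, -1):
--         row = [[s[i:i + k + 1]] + rest
--                for k in range(len(table))
--                for rest in table[k]]
--         table.insert(0, row)
--     return table[0]
-- ===== Notes on version B (the rewrite author's own statement) =====
-- stated objective: alternative
-- what changed: A enumerates partitions by recursive backtracking with mutable ds/ans accumulators; B builds a bottom-up dynamic-programming table of all partitions of every suffix s[i:] (from i=L down to 0) and returns the entry for the whole string.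
import Mathlib
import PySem

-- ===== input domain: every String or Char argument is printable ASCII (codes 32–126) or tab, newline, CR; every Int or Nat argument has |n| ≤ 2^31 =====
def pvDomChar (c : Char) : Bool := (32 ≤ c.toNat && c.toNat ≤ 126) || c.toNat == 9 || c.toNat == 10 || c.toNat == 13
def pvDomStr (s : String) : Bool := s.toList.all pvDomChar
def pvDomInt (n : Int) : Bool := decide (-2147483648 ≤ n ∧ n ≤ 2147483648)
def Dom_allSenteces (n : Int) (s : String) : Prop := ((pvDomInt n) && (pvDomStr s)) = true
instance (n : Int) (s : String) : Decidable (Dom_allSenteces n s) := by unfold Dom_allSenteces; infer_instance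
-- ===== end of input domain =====

-- B replaces A's recursive backtracking with a bottom-up dynamic-programming table of suffix partitions (objective: alternative).

-- ===== PORT A =====
-- A's inner `solve` with its `for i in range(ind, len(s))` loop; `ans`/`ds` are the
-- accumulators A mutates, threaded as arguments; `temp += s[i]` is `temp.push`.
mutual
def pySolve (cs : List Char) (ind : Nat) (ds : List String) (ans : List (List String)) :
    List (List String) :=
  if ind ≥ cs.length then ans ++ [ds]
  else pyLoop cs ind "" ds ans
termination_by 2 * (cs.length - ind) + 1
decreasing_by all_goals omega

def pyLoop (cs : List Char) (i : Nat) (temp : String) (ds : List String)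
    (ans : List (List String)) : List (List String) :=
  if h : i < cs.length then
    let temp' := temp.push cs[i]
    pyLoop cs (i + 1) temp' ds (pySolve cs (i + 1) (ds ++ [temp']) ans)
  else ans
termination_by 2 * (cs.length - i)
decreasing_by all_goals omega
end

def allSenteces (n : Int) (s : String) : List (List String) :=
  pySolve s.toList 0 [] []

-- ===== PORT B =====
-- Source B: `table` built back-to-front over i = L-1 .. 0 (a fold over range(L) reversed);
-- the row for i is the flattened comprehension over k and rest; s[i:i+k+1] is an
-- in-range slice, PySem.List.slice with natural bounds.
def allSenteces_alt (n : Int) (s : String) : List (List String) :=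
  let cs := s.toList
  let L := cs.length
  let table :=
    (List.range L).reverse.foldl
      (fun table (i : Nat) =>
        (((List.range table.length).map (fun k =>
            (table.getD k []).map (fun rest =>
              String.ofList (PySem.List.slice cs (some (i : Int)) (some ((i : Int) + (k + 1 : Nat)))) :: rest))).flatten) :: table)
      [[[]]]
  table.getD 0 []

-- ===== PRECONDITION & SPEC =====
def Spec_allSenteces (n : Int) (s : String) (out : List (List String)) : Prop := out = allSenteces_alt n s
instance (n : Int) (s : String) (out : List (List String)) : Decidable (Spec_allSenteces n s out) := by unfold Spec_allSenteces; infer_instance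

-- ===== CLAIM (what is proved, stated in full; the proofs are below) =====
def Claim_equal_allSenteces : Prop := ∀ (n : Int) (s : String), Dom_allSenteces n s → Spec_allSenteces n s (allSenteces n s)

-- ===== LEMMAS AND PROOFS =====

-- Reference enumeration of all partitions of a character list, in A's order.
def pvP : List Char → List (List String)
  | [] => [[]]
  | c :: rest =>
    ((List.range (rest.length + 1)).map (fun k =>
      (pvP (rest.drop k)).map (fun p => String.ofList (c :: rest.take k) :: p))).flatten
termination_by cs => cs.length
decreasing_by simp

theorem pvP_nil : pvP [] = [[]] := by simp [pvP]

theorem pvP_cons (c : Char) (rest : List Char) :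
    pvP (c :: rest) =
      ((List.range (rest.length + 1)).map (fun k =>
        (pvP (rest.drop k)).map (fun p => String.ofList (c :: rest.take k) :: p))).flatten := by
  conv_lhs => rw [pvP]

-- ----- A-side: pyLoop / pySolve compute ans ++ (pvP of the suffix, prefixed by ds) -----
theorem pv_push_eq (t : String) (c : Char) (l : List Char) :
    t ++ String.ofList (c :: l) = t.push c ++ String.ofList l := by
  apply String.toList_inj.mp
  simp

theorem pv_push_singleton (t : String) (c : Char) :
    t ++ String.ofList [c] = t.push c := by
  apply String.toList_inj.mp
  simp

theorem pv_main (cs : List Char) : ∀ N,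
    (∀ i temp ds ans, cs.length - i = N →
        pyLoop cs i temp ds ans =
          ans ++ ((List.range (cs.length - i)).map (fun k =>
            (pvP (cs.drop (i + k + 1))).map (fun p =>
              ds ++ ((temp ++ String.ofList ((cs.drop i).take (k + 1))) :: p)))).flatten) ∧
    (∀ ind ds ans, cs.length - ind = N →
        pySolve cs ind ds ans = ans ++ (pvP (cs.drop ind)).map (fun p => ds ++ p)) := by
  intro N
  induction N using Nat.strong_induction_on with
  | _ N IH =>
  have hloop : ∀ i temp ds ans, cs.length - i = N →
      pyLoop cs i temp ds ans =
        ans ++ ((List.range (cs.length - i)).map (fun k =>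
          (pvP (cs.drop (i + k + 1))).map (fun p =>
            ds ++ ((temp ++ String.ofList ((cs.drop i).take (k + 1))) :: p)))).flatten := by
    intro i temp ds ans hN
    rw [pyLoop]
    by_cases h : i < cs.length
    · rw [dif_pos h]
      show pyLoop cs (i + 1) (temp.push cs[i]) ds (pySolve cs (i + 1) (ds ++ [temp.push cs[i]]) ans) = _
      have hN1 : cs.length - (i + 1) = N - 1 := by omega
      have hNlt : N - 1 < N := by omega
      rw [(IH (N - 1) hNlt).2 (i + 1) (ds ++ [temp.push cs[i]]) ans hN1]
      rw [(IH (N - 1) hNlt).1 (i + 1) (temp.push cs[i]) ds _ hN1]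
      have hdrop : cs.drop i = cs[i] :: cs.drop (i + 1) := List.drop_eq_getElem_cons h
      rw [show cs.length - i = (cs.length - (i + 1)) + 1 by omega, List.range_succ_eq_map,
          List.map_cons, List.flatten_cons, List.map_map, List.append_assoc]
      congr 1
      congr 1
      · -- head piece k = 0
        simp only [Nat.zero_add, Nat.add_zero]
        apply List.map_congr_left
        intro p _
        rw [hdrop, List.take_succ_cons, List.take_zero, pv_push_singleton, List.append_assoc,
            List.singleton_append]
      · -- tail pieces k + 1
        congr 1
        apply List.map_congr_left
        intro k _
        simp only [Function.comp]
        rw [show i + 1 + k + 1 = i + (k + 1) + 1 by omega]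
        apply List.map_congr_left
        intro p _
        rw [hdrop, List.take_succ_cons, pv_push_eq]
    · rw [dif_neg h]
      rw [show cs.length - i = 0 by omega]
      simp
  refine ⟨hloop, ?_⟩
  intro ind ds ans hN
  rw [pySolve]
  by_cases h : ind ≥ cs.length
  · rw [if_pos h, List.drop_of_length_le h, pvP_nil]
    simp
  · rw [if_neg h]
    have h' : ind < cs.length := by omega
    have hdrop : cs.drop ind = cs[ind] :: cs.drop (ind + 1) := List.drop_eq_getElem_cons h'
    rw [hloop ind "" ds ans hN, hdrop, pvP_cons]
    rw [List.map_flatten, List.map_map, ← hdrop]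
    rw [show (cs.drop (ind + 1)).length + 1 = cs.length - ind by
      simp; omega]
    congr 1
    congr 1
    apply List.map_congr_left
    intro k _
    simp only [Function.comp]
    rw [List.drop_drop, show ind + 1 + k = ind + k + 1 by omega, List.map_map]
    apply List.map_congr_left
    intro p _
    simp only [Function.comp]
    rw [hdrop, List.take_succ_cons]
    simp

theorem allSenteces_eq_pvP (n : Int) (s : String) : allSenteces n s = pvP s.toList := by
  unfold allSenteces
  rw [(pv_main s.toList (s.toList.length - 0)).2 0 [] [] rfl]
  simp

-- ----- B-side: the fold builds the table of pvP of all suffixes -----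
def pvTblSpec (cs : List Char) (i : Nat) : List (List (List String)) :=
  (List.range (cs.length - i + 1)).map (fun t => pvP (cs.drop (i + t)))

def pvStep (cs : List Char) : List (List (List String)) → Nat → List (List (List String)) :=
  fun table i =>
    (((List.range table.length).map (fun k =>
        (table.getD k []).map (fun rest =>
          String.ofList (PySem.List.slice cs (some (i : Int)) (some ((i : Int) + (k + 1 : Nat)))) :: rest))).flatten) :: table

theorem pvStep_spec (cs : List Char) (i : Nat) (h : i < cs.length) :
    pvStep cs (pvTblSpec cs (i + 1)) i = pvTblSpec cs i := by
  have hlen : (pvTblSpec cs (i + 1)).length = cs.length - i := by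
    simp [pvTblSpec]; omega
  have hget : ∀ k, k < cs.length - i →
      (pvTblSpec cs (i + 1)).getD k [] = pvP (cs.drop (i + 1 + k)) := by
    intro k hk
    have hk' : k < cs.length - (i + 1) + 1 := by omega
    simp [pvTblSpec, List.getD, List.getElem?_map, List.getElem?_range hk']
  have hdrop : cs.drop i = cs[i] :: cs.drop (i + 1) := List.drop_eq_getElem_cons h
  have hrest : (cs.drop (i + 1)).length = cs.length - (i + 1) := by simp
  unfold pvStep
  conv_rhs => rw [pvTblSpec, List.range_succ_eq_map, List.map_cons, List.map_map]
  congr 1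
  · -- new row = pvP (cs.drop (i + 0))
    rw [hlen]
    simp only [Nat.add_zero]
    conv_rhs => rw [hdrop, pvP_cons]
    rw [hrest, show cs.length - (i + 1) + 1 = cs.length - i by omega]
    congr 1
    apply List.map_congr_left
    intro k hk
    rw [List.mem_range] at hk
    rw [hget k hk, PySem.List.slice_natCast_add, List.drop_drop, hdrop, List.take_succ_cons]
  · rw [pvTblSpec, show cs.length - (i + 1) + 1 = cs.length - i by omega]
    apply List.map_congr_left
    intro t _
    simp only [Function.comp]
    rw [show i + 1 + t = i + (t + 1) by omega]

theorem pvFold_spec (cs : List Char) : ∀ m, m ≤ cs.length →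
    (List.range m).reverse.foldl (pvStep cs) (pvTblSpec cs m) = pvTblSpec cs 0 := by
  intro m
  induction m with
  | zero => intro _; simp
  | succ m ih =>
    intro hm
    rw [List.range_succ, List.reverse_append, List.reverse_singleton, List.singleton_append,
        List.foldl_cons, pvStep_spec cs m (by omega)]
    exact ih (by omega)

theorem allSenteces_alt_eq_pvP (n : Int) (s : String) : allSenteces_alt n s = pvP s.toList := by
  have h0 : ([[[]]] : List (List (List String))) = pvTblSpec s.toList s.toList.length := by
    simp only [pvTblSpec]
    rw [show s.toList.length - s.toList.length + 1 = 1 by omega]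
    simp [List.drop_of_length_le, pvP_nil]
  unfold allSenteces_alt
  show ((List.range s.toList.length).reverse.foldl (pvStep s.toList) [[[]]]).getD 0 [] = _
  rw [h0, pvFold_spec s.toList s.toList.length le_rfl]
  simp [pvTblSpec, List.range_succ_eq_map, List.getD]

-- ===== VERDICT (by name: the statement is the Claim_ definition above) =====
theorem allSenteces_spec : Claim_equal_allSenteces := by
  intro n s _
  unfold Spec_allSenteces
  rw [allSenteces_eq_pvP, allSenteces_alt_eq_pvP]
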